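-- pv_equiv track=rewrite | github.com/Katoedi/mi-2 | src/hangman.py | filtreaza_cuvinte
-- ===== SOURCE A (Python) =====
-- def asemanare_cuvinte(cuvant, model):
--     if len(cuvant) != len(model):
--         return False
--     for litera_cuvant, litera_model in zip(cuvant, model):
--         if litera_model != "*" and litera_cuvant != litera_model:
--             return False
--     return True
--
-- def filtreaza_cuvinte(dictionar, model, litere_incluse=None, litere_excluse=None):
--     if litere_incluse is None:
--         litere_incluse = set()
--     if litere_excluse is None:
--         litere_excluse = set()
--
--     rezultat = []
--
--     for cuvant in dictionar:
--         # 1. se potrivește cu modelul (cu *)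
--         if not asemanare_cuvinte(cuvant, model):
--             continue
--
--         # 2. nu conține litere excluse
--         if any(litera_exclusa in cuvant for litera_exclusa in litere_excluse):
--             continue
--
--         # 3. conține toate literele obligatorii
--         if not all(litera_obligatorie in cuvant for litera_obligatorie in litere_incluse):
--             continue
--
--         rezultat.append(cuvant)
--
--     return rezultat
-- ===== SOURCE B (Python) =====
-- def filtreaza_cuvinte(dictionar, model, litere_incluse=None, litere_excluse=None):
--     # staged sieve: start from all words of the right length, then narrow the
--     # candidate list once per constraint (loop over constraints outside,
--     # over words inside), preserving dictionary order throughout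
--     candidati = [w for w in dictionar if len(w) == len(model)]
--     for i, ch in enumerate(model):
--         if ch != '*':
--             candidati = [w for w in candidati if w[i] == ch]
--     for e in (litere_excluse if litere_excluse is not None else []):
--         candidati = [w for w in candidati if e not in w]
--     for l in (litere_incluse if litere_incluse is not None else []):
--         candidati = [w for w in candidati if l in w]
--     return candidati
-- ===== Notes on version B (the rewrite author's own statement) =====
-- stated objective: alternative
-- what changed: B replaces A's single pass over words (each word tested char-by-char against the model plus two membership scans) by a staged sieve: one candidate list narrowed by successive filtering passes, one per fixed model position, per excluded letter and per included letter (loop interchange: constraints outer, words inner).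
import Mathlib
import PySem

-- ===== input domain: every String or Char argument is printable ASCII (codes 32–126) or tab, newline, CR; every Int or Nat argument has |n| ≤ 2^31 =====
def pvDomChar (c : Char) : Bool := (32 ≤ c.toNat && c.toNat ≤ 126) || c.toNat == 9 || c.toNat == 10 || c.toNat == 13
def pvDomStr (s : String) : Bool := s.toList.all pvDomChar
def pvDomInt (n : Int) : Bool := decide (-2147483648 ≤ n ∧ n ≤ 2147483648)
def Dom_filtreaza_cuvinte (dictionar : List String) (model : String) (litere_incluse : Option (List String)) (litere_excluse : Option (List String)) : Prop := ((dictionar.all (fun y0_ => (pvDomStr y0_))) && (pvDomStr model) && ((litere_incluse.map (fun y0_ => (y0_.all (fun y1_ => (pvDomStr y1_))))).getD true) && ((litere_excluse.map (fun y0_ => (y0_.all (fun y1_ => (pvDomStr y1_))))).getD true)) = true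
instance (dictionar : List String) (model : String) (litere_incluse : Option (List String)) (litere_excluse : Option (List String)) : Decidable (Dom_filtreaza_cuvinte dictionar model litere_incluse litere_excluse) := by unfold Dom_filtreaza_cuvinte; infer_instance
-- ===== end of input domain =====

-- ===== PORT A =====
-- B replaces A's single per-word pass (three-part test per word) by a staged sieve:
-- one candidate list repeatedly narrowed by a filtering pass per model constraint,
-- per excluded letter and per included letter; objective: alternative, same cost.
def asemanare_cuvinte (cuvant model : String) : Bool :=
  if PySem.Str.len cuvant ≠ PySem.Str.len model then false
  else (cuvant.toList.zip model.toList).all (fun p => !(p.2 != '*' && p.1 != p.2))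

def filtreaza_cuvinte (dictionar : List String) (model : String) (litere_incluse : Option (List String)) (litere_excluse : Option (List String)) : List String :=
  let incl := litere_incluse.getD []
  let excl := litere_excluse.getD []
  dictionar.foldl (fun rezultat cuvant =>
    if !(asemanare_cuvinte cuvant model) then rezultat
    else if excl.any (fun l => PySem.Str.isIn l cuvant) then rezultat
    else if !(incl.all (fun l => PySem.Str.isIn l cuvant)) then rezultat
    else rezultat ++ [cuvant]) []

-- ===== PORT B =====
def filtreaza_cuvinte_alt (dictionar : List String) (model : String) (litere_incluse : Option (List String)) (litere_excluse : Option (List String)) : List String :=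
  let c0 := dictionar.filter (fun w => PySem.Str.len w == PySem.Str.len model)
  let c1 := (PySem.List.enumerate model.toList 0).foldl
      (fun cand p => if p.2 != '*' then cand.filter (fun w => PySem.Str.pyGet? w p.1 == some p.2) else cand) c0
  let c2 := (litere_excluse.getD []).foldl (fun cand e => cand.filter (fun w => !(PySem.Str.isIn e w))) c1
  (litere_incluse.getD []).foldl (fun cand l => cand.filter (fun w => PySem.Str.isIn l w)) c2

-- ===== PRECONDITION & SPEC =====
def Spec_filtreaza_cuvinte (dictionar : List String) (model : String) (litere_incluse : Option (List String)) (litere_excluse : Option (List String)) (out : List String) : Prop := out = filtreaza_cuvinte_alt dictionar model litere_incluse litere_excluse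
instance (dictionar : List String) (model : String) (litere_incluse : Option (List String)) (litere_excluse : Option (List String)) (out : List String) : Decidable (Spec_filtreaza_cuvinte dictionar model litere_incluse litere_excluse out) := by unfold Spec_filtreaza_cuvinte; infer_instance

-- ===== CLAIM (what is proved, stated in full; the proofs are below) =====
def Claim_equal_filtreaza_cuvinte : Prop := ∀ (dictionar : List String) (model : String) (litere_incluse : Option (List String)) (litere_excluse : Option (List String)), Dom_filtreaza_cuvinte dictionar model litere_incluse litere_excluse → Spec_filtreaza_cuvinte dictionar model litere_incluse litere_excluse (filtreaza_cuvinte dictionar model litere_incluse litere_excluse)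

-- ===== LEMMAS AND PROOFS =====

-- a fold of filtering passes is one filter by the conjunction of the passes' tests
lemma foldl_filter_eq_filter_all {a b : Type} (p : b -> a -> Bool) (xs : List b) (c : List a) :
    xs.foldl (fun cand x => cand.filter (p x)) c = c.filter (fun w => xs.all (fun x => p x w)) := by
  induction xs generalizing c with
  | nil => simp
  | cons x t ih => simp [ih, List.filter_filter, Bool.and_comm]

-- a conditional filtering pass is a filtering pass with a weakened test
lemma ite_filter {a : Type} (cond : Bool) (q : a -> Bool) (c : List a) :
    (if cond then c.filter q else c) = c.filter (fun w => !cond || q w) := by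
  cases cond <;> simp

lemma all_filter_or {a : Type} (l : List a) (p q : a -> Bool) :
    (l.filter p).all q = l.all (fun x => !p x || q x) := by
  induction l with
  | nil => rfl
  | cons x t ih => by_cases h : p x = true <;> simp_all

-- A's char-by-char model match equals the conjunction of the per-position tests over enumerate
lemma asemanare_eq_constraints (w model : String) :
    asemanare_cuvinte w model =
      ((PySem.Str.len w == PySem.Str.len model) &&
        ((PySem.List.enumerate model.toList 0).filter (fun p => p.2 != '*')).all
          (fun p => PySem.Str.pyGet? w p.1 == some p.2)) := by
  rcases eq_or_ne (PySem.Str.len w) (PySem.Str.len model) with hlen | hlen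
  · have hl : w.toList.length = model.toList.length := by
      simpa using hlen
    rw [Bool.eq_iff_iff]
    simp only [asemanare_cuvinte, hlen, ne_eq, not_true_eq_false, if_false,
      List.all_eq_true]
    have hkey : ∀ k (hk : k < model.toList.length),
        (w.toList.zip model.toList)[k]'(by rw [List.length_zip]; omega) =
          (w.toList[k]'(by omega), model.toList[k]'hk) := by
      intro k hk
      exact List.getElem_zip
    constructor
    · intro h
      simp only [beq_self_eq_true, Bool.true_and, List.all_eq_true, List.mem_filter,
        PySem.List.mem_enumerate_iff]
      rintro ⟨i, c⟩ ⟨⟨k, hk, hp⟩, hstar⟩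
      have hik : i = (k : Int) ∧ c = model.toList[k]'hk := by
        constructor <;> · injection hp with h1 h2 <;> simp_all
      obtain ⟨rfl, rfl⟩ := hik
      have hz : k < (w.toList.zip model.toList).length := by rw [List.length_zip]; omega
      have hh := h _ (List.getElem_mem hz)
      rw [hkey k hk] at hh
      simp only [Bool.not_and, Bool.or_eq_true, Bool.not_eq_eq_eq_not,
        Bool.not_true, bne_eq_false_iff_eq] at hh
      have hwk : w.toList[k]'(by omega) = model.toList[k]'hk := by
        rcases hh with h1 | h1
        · exact absurd h1 (by simpa using hstar)
        · exact h1
      simp [PySem.List.pyGet?_natCast,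
        List.getElem?_eq_getElem (by omega : k < w.toList.length), hwk]
    · intro h
      simp only [beq_self_eq_true, Bool.true_and, List.all_eq_true, List.mem_filter,
        PySem.List.mem_enumerate_iff] at h
      intro x hx
      obtain ⟨k, hk, rfl⟩ := List.mem_iff_getElem.mp hx
      have hk' : k < model.toList.length := by
        rw [List.length_zip] at hk; omega
      rw [hkey k hk']
      by_cases hstar : model.toList[k]'hk' = '*'
      · simp [hstar]
      · have hm := h ((k : Int), model.toList[k]'hk') ⟨⟨k, hk', by simp⟩, by simpa using hstar⟩
        simp only [beq_iff_eq, PySem.Str.pyGet?_eq, PySem.Chars.pyGet?_eq_listPyGet?, PySem.List.pyGet?_natCast,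
          List.getElem?_eq_getElem (by omega : k < w.toList.length), Option.some_inj] at hm
        simp [hm]
  · have hne : w.length ≠ model.length := fun h => hlen (by simp [h])
    simp [asemanare_cuvinte, hne]

-- collapse A's continue-style if-chain into one guarded append
lemma ifchain {a : Type} (rez : List a) (c : a) (x e i : Bool) :
    (if !x then rez else if e then rez else if !i then rez else rez ++ [c]) =
    (if x && (!e && i) then rez ++ [c] else rez) := by
  cases x <;> cases e <;> cases i <;> simp

-- ===== VERDICT (by name: the statement is the Claim_ definition above) =====
theorem filtreaza_cuvinte_spec : Claim_equal_filtreaza_cuvinte := by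
  intro dictionar model litere_incluse litere_excluse _
  unfold Spec_filtreaza_cuvinte filtreaza_cuvinte filtreaza_cuvinte_alt
  simp only [ifchain, PySem.List.foldl_append_if_eq_filter, List.nil_append]
  conv_rhs =>
    rw [show (fun (cand : List String) (p : Int × Char) =>
          if p.2 != '*' then cand.filter (fun w => PySem.Str.pyGet? w p.1 == some p.2) else cand)
        = fun cand p => cand.filter (fun w => !(p.2 != '*') || (PySem.Str.pyGet? w p.1 == some p.2))
      from funext fun cand => funext fun p => ite_filter _ _ cand]
  rw [foldl_filter_eq_filter_all, foldl_filter_eq_filter_all, foldl_filter_eq_filter_all,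
    List.filter_filter, List.filter_filter, List.filter_filter]
  refine List.filter_congr (fun w _ => ?_)
  rw [asemanare_eq_constraints, all_filter_or]
  cases hlen : (PySem.Str.len w == PySem.Str.len model) <;>
  cases hc : (PySem.List.enumerate model.toList 0).all
      (fun p => !(p.2 != '*') || (PySem.Str.pyGet? w p.1 == some p.2)) <;>
  cases he : (litere_excluse.getD []).any (fun l => PySem.Str.isIn l w) <;>
  cases hi : (litere_incluse.getD []).all (fun l => PySem.Str.isIn l w) <;>
    simp_all [List.all_eq_not_any_not]
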